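-- pv_equiv track=rewrite | github.com/Juroldang/code | PC - 2024 - 1/Taller 8 - PC 2024-1/Taller 8 - Estudiantes por programa.py | program_dict
-- ===== SOURCE A (Python) =====
-- def program_dict(students):
--     dicPro = {}
--     for student in students:
--         prog = student['programa']
--         if prog not in dicPro:
--             dicPro[prog] = [student['nombre']]
--         else: dicPro[prog].append(student['nombre'])
--     dicPro = dict(sorted(dicPro.items()))
--     for prog in dicPro:
--         dicPro[prog] = sorted(dicPro[prog])
--     return dicPro
-- ===== SOURCE B (Python) =====
-- def program_dict(students):
--     progs = sorted({s['programa'] for s in students})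
--     return {p: sorted(s['nombre'] for s in students if s['programa'] == p)
--             for p in progs}
-- ===== Notes on version B (the rewrite author's own statement) =====
-- stated objective: simpler
-- what changed: Replaces A's incremental dict-grouping loop followed by an item sort and a per-key value-sorting loop with a two-liner: sort the distinct program set once, then build the result with one dict comprehension that filters and sorts each program's names.
import Mathlib
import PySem

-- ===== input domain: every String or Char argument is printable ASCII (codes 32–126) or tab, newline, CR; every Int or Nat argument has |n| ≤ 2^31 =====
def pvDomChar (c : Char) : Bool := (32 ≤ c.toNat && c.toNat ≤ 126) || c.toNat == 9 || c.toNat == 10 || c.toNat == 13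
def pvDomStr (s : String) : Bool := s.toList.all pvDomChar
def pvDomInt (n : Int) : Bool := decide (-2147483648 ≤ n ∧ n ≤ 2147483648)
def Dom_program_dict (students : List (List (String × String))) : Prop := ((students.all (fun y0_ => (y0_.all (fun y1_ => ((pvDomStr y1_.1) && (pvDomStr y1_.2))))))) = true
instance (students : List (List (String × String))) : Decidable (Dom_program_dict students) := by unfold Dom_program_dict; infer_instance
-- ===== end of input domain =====

-- B is a simpler decomposition (sorted distinct programs + one filtering comprehension) instead of
-- A's grouping dict + item sort + per-key sort; equal return value on every input where A returns.

-- student['k'] on the assoc-list model of a student dict: first match (Python raises KeyError when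
-- absent — those inputs are excluded by Pre_; the "" default is never reached inside Pre_).
def pvLookup (s : List (String × String)) (k : String) : String :=
  ((s.find? (fun p => p.1 == k)).map (fun p => p.2)).getD ""

-- ===== PORT A =====
-- The dicts are modeled per the type convention as insertion-ordered assoc lists (PySem.Dict /
-- List of pairs). 'dict(sorted(dicPro.items()))' sorts items by the (key, value) tuple; dict keys
-- are unique, so Python's tuple comparison reduces to comparing the key, ported as key = fst.
-- The final per-key re-assignment loop keeps each key in place, ported as a map over the items.
def program_dict (students : List (List (String × String))) : List (String × List String) :=
  let dicPro := students.foldl (fun d s =>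
      if d.contains (pvLookup s "programa") = false then
        d.insert (pvLookup s "programa") [pvLookup s "nombre"]
      else
        d.insert (pvLookup s "programa") (d.getD (pvLookup s "programa") [] ++ [pvLookup s "nombre"]))
    PySem.Dict.empty
  (PySem.List.sorted dicPro.items (fun p => p.1)).map
    (fun p => (p.1, PySem.List.sorted p.2 (fun x => x)))

-- ===== PORT B =====
def program_dict_alt (students : List (List (String × String))) : List (String × List String) :=
  let progs := PySem.List.sorted
    (PySem.Set.ofList (students.map (fun s => pvLookup s "programa"))) (fun x => x)
  progs.map (fun p =>
    (p, PySem.List.sorted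
          ((students.filter (fun s => pvLookup s "programa" == p)).map (fun s => pvLookup s "nombre"))
          (fun x => x)))

-- ===== PRECONDITION & SPEC =====
-- Pre_ excludes exactly the inputs where the Python A raises KeyError: a student dict missing the
-- key 'programa' or 'nombre'.
def Pre_program_dict (students : List (List (String × String))) : Prop :=
  ∀ s ∈ students, "programa" ∈ s.map Prod.fst ∧ "nombre" ∈ s.map Prod.fst
instance (students : List (List (String × String))) : Decidable (Pre_program_dict students) := by
  unfold Pre_program_dict; infer_instance

def pvWitness_program_dict : (List (List (String × String))) :=
  [[("programa", "Math"), ("nombre", "Ana")], [("programa", "Math"), ("nombre", "Bob")]]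

def Spec_program_dict (students : List (List (String × String))) (out : List (String × List String)) : Prop := out = program_dict_alt students
instance (students : List (List (String × String))) (out : List (String × List String)) : Decidable (Spec_program_dict students out) := by unfold Spec_program_dict; infer_instance

-- ===== CLAIM (what is proved, stated in full; the proofs are below) =====
def Claim_equal_program_dict : Prop := ∀ (students : List (List (String × String))), Dom_program_dict students → Pre_program_dict students → Spec_program_dict students (program_dict students)

-- ===== LEMMAS AND PROOFS =====

-- the two field extractors and the (programa, nombre) pair list the proofs factor through
def pvKey (s : List (String × String)) : String := pvLookup s "programa"
def pvName (s : List (String × String)) : String := pvLookup s "nombre"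
def pvPairs (students : List (List (String × String))) : List (String × String) :=
  students.map (fun s => (pvKey s, pvName s))

-- A's grouping loop is the canonical modify-fold over the (key, name) pairs
theorem pvGroupLoop (students : List (List (String × String))) :
    students.foldl (fun d s =>
      if d.contains (pvLookup s "programa") = false then
        d.insert (pvLookup s "programa") [pvLookup s "nombre"]
      else
        d.insert (pvLookup s "programa") (d.getD (pvLookup s "programa") [] ++ [pvLookup s "nombre"]))
      PySem.Dict.empty
    = (pvPairs students).foldl (fun d p => d.modify p.1 [] (fun v => v ++ [p.2])) PySem.Dict.empty := by
  rw [pvPairs, List.foldl_map]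
  apply PySem.List.foldl_congr_mem
  intro acc s _
  simp only [pvKey, pvName, PySem.Dict.modify]
  by_cases h : acc.contains (pvLookup s "programa") = false
  · rw [if_pos h, PySem.Dict.getD_of_not_contains acc [] h, List.nil_append]
  · rw [if_neg h]

-- items of the grouped dict: distinct keys in first-occurrence order, each with its name list
theorem pvGroupedItems (students : List (List (String × String))) :
    ((pvPairs students).foldl (fun d p => d.modify p.1 [] (fun v => v ++ [p.2]))
        PySem.Dict.empty).items
    = (PySem.Set.ofList ((pvPairs students).map Prod.fst)).map
        (fun k => (k, (((pvPairs students).filter (fun p => p.1 == k)).map (fun p => p.2)))) := by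
  have hkeys : ((pvPairs students).foldl (fun d p => d.modify p.1 [] (fun v => v ++ [p.2]))
      PySem.Dict.empty).keys = PySem.Set.ofList ((pvPairs students).map Prod.fst) := by
    rw [PySem.Dict.keys_foldl_modify_key (pvPairs students) Prod.fst []
      (fun _ p => (fun v => v ++ [p.2])) PySem.Dict.empty]
    simp [PySem.Set.update_nil_left]
  have hnd : ((pvPairs students).foldl (fun d p => d.modify p.1 [] (fun v => v ++ [p.2]))
      PySem.Dict.empty).keys.Nodup := by
    rw [hkeys]; exact PySem.Set.nodup_ofList _
  rw [PySem.Dict.items_eq_map_keys _ hnd [], hkeys]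
  apply List.map_congr_left
  intro k _
  rw [PySem.Dict.getD_foldl_modify_append]
  simp

-- sorting the items of a strictly-fst-keyed map is mapping over the sorted key set
theorem pvSortedItems (students : List (List (String × String)))
    (F : String → (String × List String)) (hF : ∀ k, (F k).1 = k) :
    PySem.List.sorted ((PySem.Set.ofList ((pvPairs students).map Prod.fst)).map F) (fun p => p.1)
    = (PySem.List.sorted (PySem.Set.ofList ((pvPairs students).map Prod.fst)) (fun x => x)).map F := by
  apply PySem.List.sorted_eq_of_perm_of_pairwise_lt
  · exact (PySem.List.sorted_perm _ _ false).map F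
  · have := PySem.List.sorted_ofList_pairwise_lt ((pvPairs students).map Prod.fst)
    refine (List.pairwise_map.mpr ?_)
    refine this.imp ?_
    intro a b hab
    rw [hF a, hF b]; exact hab

-- the pair-list projections rewritten back to the student list
theorem pvPairs_fst (students : List (List (String × String))) :
    (pvPairs students).map Prod.fst = students.map (fun s => pvLookup s "programa") := by
  simp [pvPairs, pvKey]

theorem pvPairs_group (students : List (List (String × String))) (k : String) :
    ((pvPairs students).filter (fun p => p.1 == k)).map (fun p => p.2)
    = (students.filter (fun s => pvLookup s "programa" == k)).map (fun s => pvLookup s "nombre") := by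
  simp [pvPairs, pvKey, pvName, List.filter_map, Function.comp_def]

theorem pvMain (students : List (List (String × String))) :
    program_dict students = program_dict_alt students := by
  show (PySem.List.sorted _ _).map _ = _
  rw [pvGroupLoop, pvGroupedItems,
    pvSortedItems students
      (fun k => (k, ((pvPairs students).filter (fun p => p.1 == k)).map (fun p => p.2)))
      (fun _ => rfl)]
  rw [program_dict_alt, List.map_map]
  rw [pvPairs_fst]
  apply List.map_congr_left
  intro k _
  show (k, PySem.List.sorted (((pvPairs students).filter (fun p => p.1 == k)).map (fun p => p.2)) _) = _
  rw [pvPairs_group]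

-- ===== VERDICT (by name: the statement is the Claim_ definition above) =====
theorem program_dict_spec : Claim_equal_program_dict := by
  intro students _ _
  exact pvMain students
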